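-- pv_equiv track=rewrite | github.com/paiml/depyler | examples/hard_tree_bst.py | bst_delete
-- ===== SOURCE A (Python) =====
-- def bst_delete(arr: list[int], val: int) -> list[int]:
--     """Delete first occurrence of val from sorted array."""
--     result: list[int] = []
--     deleted: int = 0
--     i: int = 0
--     while i < len(arr):
--         if deleted == 0 and arr[i] == val:
--             deleted = 1
--         else:
--             result.append(arr[i])
--         i = i + 1
--     return result
-- ===== SOURCE B (Python) =====
-- def bst_delete(arr: list[int], val: int) -> list[int]:
--     """Delete first occurrence of val from sorted array."""
--     if val in arr:
--         i = arr.index(val)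
--         return arr[:i] + arr[i + 1:]
--     return arr[:]
-- ===== Notes on version B (the rewrite author's own statement) =====
-- stated objective: simpler
-- what changed: Replaced the element-wise copy loop with a deleted flag by locating the first occurrence and concatenating the two slices around it (copying the whole list when absent).
import Mathlib
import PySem

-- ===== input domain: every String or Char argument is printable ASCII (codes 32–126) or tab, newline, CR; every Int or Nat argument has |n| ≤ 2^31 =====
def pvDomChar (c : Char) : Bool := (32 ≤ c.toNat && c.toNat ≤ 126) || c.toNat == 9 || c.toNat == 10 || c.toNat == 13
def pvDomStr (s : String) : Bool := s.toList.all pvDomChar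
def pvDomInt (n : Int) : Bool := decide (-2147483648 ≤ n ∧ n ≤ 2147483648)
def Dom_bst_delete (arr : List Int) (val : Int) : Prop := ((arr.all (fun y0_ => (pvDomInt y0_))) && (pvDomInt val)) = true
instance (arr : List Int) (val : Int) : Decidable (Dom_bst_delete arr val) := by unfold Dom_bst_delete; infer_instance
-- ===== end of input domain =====

-- B deletes the first occurrence by slicing around its index instead of A's guarded copy loop (objective: simpler).

-- ===== PORT A =====
-- Python A: one pass over arr accumulating result and a 'deleted' flag.
def bstStepA (val : Int) (s : List Int × Int) (x : Int) : List Int × Int :=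
  if s.2 == 0 && x == val then (s.1, 1) else (s.1 ++ [x], s.2)

def bst_delete (arr : List Int) (val : Int) : List Int :=
  (arr.foldl (bstStepA val) (([] : List Int), (0 : Int))).1

-- ===== PORT B =====
-- Python B: if val in arr then arr[:i] + arr[i+1:] with i = arr.index(val), else arr[:].
def bst_delete_alt (arr : List Int) (val : Int) : List Int :=
  if arr.contains val then
    match PySem.List.index? arr val with
    | some i =>
        PySem.List.slice arr none (some (i : Int)) ++
        PySem.List.slice arr (some ((i : Int) + 1)) none
    | none => arr
  else arr

-- ===== PRECONDITION & SPEC =====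
def Spec_bst_delete (arr : List Int) (val : Int) (out : List Int) : Prop := out = bst_delete_alt arr val
instance (arr : List Int) (val : Int) (out : List Int) : Decidable (Spec_bst_delete arr val out) := by unfold Spec_bst_delete; infer_instance

-- ===== CLAIM (what is proved, stated in full; the proofs are below) =====
def Claim_equal_bst_delete : Prop := ∀ (arr : List Int) (val : Int), Dom_bst_delete arr val → Spec_bst_delete arr val (bst_delete arr val)

-- ===== LEMMAS AND PROOFS =====

-- reference "delete first occurrence" both ports are reduced to
def delFirst (val : Int) : List Int → List Int
  | [] => []
  | x :: xs => if x = val then xs else x :: delFirst val xs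

theorem bstStepA_one (val : Int) (acc : List Int) (x : Int) :
    bstStepA val (acc, 1) x = (acc ++ [x], 1) := by
  simp [bstStepA]

theorem bstStepA_zero (val : Int) (acc : List Int) (x : Int) :
    bstStepA val (acc, 0) x = if x = val then (acc, 1) else (acc ++ [x], 0) := by
  by_cases h : x = val <;> simp [bstStepA, h]

-- A's fold after the flag is set just appends the rest
theorem foldA_flag (arr : List Int) (val : Int) (acc : List Int) :
    arr.foldl (bstStepA val) (acc, (1 : Int)) = (acc ++ arr, 1) := by
  induction arr generalizing acc with
  | nil => simp
  | cons x xs ih => rw [List.foldl_cons, bstStepA_one, ih]; simp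

theorem foldA_eq (arr : List Int) (val : Int) (acc : List Int) :
    (arr.foldl (bstStepA val) (acc, (0 : Int))).1 = acc ++ delFirst val arr := by
  induction arr generalizing acc with
  | nil => simp [delFirst]
  | cons x xs ih =>
    rw [List.foldl_cons, bstStepA_zero]
    by_cases h : x = val
    · rw [if_pos h, foldA_flag, delFirst, if_pos h]
    · rw [if_neg h, ih, delFirst, if_neg h]; simp

theorem bst_delete_eq_delFirst (arr : List Int) (val : Int) :
    bst_delete arr val = delFirst val arr := by
  simpa using foldA_eq arr val []

theorem alt_not_mem (arr : List Int) (val : Int) (hm : val ∉ arr) :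
    bst_delete_alt arr val = arr := by
  unfold bst_delete_alt
  rw [if_neg (by simpa using hm)]

theorem alt_mem (arr : List Int) (val : Int) (i : Nat)
    (hm : val ∈ arr) (hi : PySem.List.index? arr val = some i) :
    bst_delete_alt arr val = arr.take i ++ arr.drop (i + 1) := by
  unfold bst_delete_alt
  rw [if_pos (by simpa using hm), hi]
  dsimp only
  rw [show ((i : Int) + 1) = (((i + 1 : Nat) : Int)) by push_cast; ring,
    PySem.List.slice_to_natCast, PySem.List.slice_from_natCast]

theorem delFirst_not_mem (arr : List Int) (val : Int) (hm : val ∉ arr) :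
    delFirst val arr = arr := by
  induction arr with
  | nil => rfl
  | cons x xs ih =>
    rw [delFirst, if_neg (by rintro rfl; exact hm (List.mem_cons_self ..)),
      ih (fun h => hm (List.mem_cons_of_mem _ h))]

theorem delFirst_of_index? (arr : List Int) (val : Int) (i : Nat)
    (hi : PySem.List.index? arr val = some i) :
    delFirst val arr = arr.take i ++ arr.drop (i + 1) := by
  induction arr generalizing i with
  | nil => simp [PySem.List.index?] at hi
  | cons x xs ih =>
    by_cases h : x = val
    · subst h
      rw [PySem.List.index?_cons_self] at hi
      obtain rfl : i = 0 := by simpa using hi.symm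
      simp [delFirst]
    · rw [PySem.List.index?_cons_of_ne xs h] at hi
      obtain ⟨j, hj, rfl⟩ := Option.map_eq_some_iff.mp hi
      rw [delFirst, if_neg h, ih j hj]
      simp [List.take_succ_cons, List.drop_succ_cons]

theorem bst_delete_alt_eq_delFirst (arr : List Int) (val : Int) :
    bst_delete_alt arr val = delFirst val arr := by
  by_cases hm : val ∈ arr
  · obtain ⟨i, hi⟩ := Option.isSome_iff_exists.mp
      ((PySem.List.index?_isSome_iff (xs := arr) (v := val)).mpr hm)
    rw [alt_mem arr val i hm hi, delFirst_of_index? arr val i hi]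
  · rw [alt_not_mem arr val hm, delFirst_not_mem arr val hm]

-- ===== VERDICT (by name: the statement is the Claim_ definition above) =====
theorem bst_delete_spec : Claim_equal_bst_delete := by
  intro arr val _
  unfold Spec_bst_delete
  rw [bst_delete_eq_delFirst, bst_delete_alt_eq_delFirst]
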